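-- pv_equiv track=rewrite | github.com/ward-segers/courses | achterhoede.py | zien
-- ===== SOURCE A (Python) =====
-- def zien(hoeden):
--     # Stap 1: Bepaal voor elke persoon de kleur die ze in hun hoofd houden
--     kleuren_in_hoofd = []
--     for i in range(len(hoeden)):
--         # Tel het aantal rode hoeden voor de huidige persoon
--         aantal_rode_hoeden = hoeden[:i].count('R')
--
--         # Als het aantal rode hoeden oneven is, houdt de persoon rood in zijn hoofd
--         if aantal_rode_hoeden % 2 == 1:
--             kleuren_in_hoofd.append('R')
--         else:
--             kleuren_in_hoofd.append('B')
--
--     return tuple(kleuren_in_hoofd)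
-- ===== SOURCE B (Python) =====
-- def zien(hoeden):
--     # One pass: keep the running parity of red hats seen so far.
--     kleuren = []
--     parity = False
--     for hoed in hoeden:
--         kleuren.append('R' if parity else 'B')
--         if hoed == 'R':
--             parity = not parity
--     return tuple(kleuren)
-- ===== Notes on version B (the rewrite author's own statement) =====
-- stated objective: faster
-- what changed: Replaces the per-position prefix slice-and-count with a single pass that maintains the running parity of red hats seen so far.
import Mathlib
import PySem

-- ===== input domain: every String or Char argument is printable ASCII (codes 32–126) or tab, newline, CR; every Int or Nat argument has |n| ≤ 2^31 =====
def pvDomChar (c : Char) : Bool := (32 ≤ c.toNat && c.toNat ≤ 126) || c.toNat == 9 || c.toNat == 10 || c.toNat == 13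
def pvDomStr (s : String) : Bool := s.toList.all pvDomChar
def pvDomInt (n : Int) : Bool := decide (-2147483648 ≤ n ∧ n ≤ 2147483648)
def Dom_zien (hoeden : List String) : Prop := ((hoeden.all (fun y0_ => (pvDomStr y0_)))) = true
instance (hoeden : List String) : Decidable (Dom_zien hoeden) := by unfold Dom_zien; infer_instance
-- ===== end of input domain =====

-- B replaces A's quadratic per-position prefix slice-and-count by a single pass that
-- maintains the running parity of red hats; asymptotically faster (O(n) vs O(n^2)).

-- ===== PORT A =====
-- for i in range(len(hoeden)): count 'R' in hoeden[:i], append 'R' if odd else 'B'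
def zien (hoeden : List String) : List String :=
  (PySem.List.pyRange 0 (hoeden.length : Int) 1).foldl
    (fun kleuren i =>
      let aantal := PySem.List.count (PySem.List.slice hoeden none (some i)) "R"
      if aantal % 2 = 1 then kleuren ++ ["R"] else kleuren ++ ["B"])
    []

-- ===== PORT B =====
-- one pass: state = (kleuren so far, parity of red hats seen so far)
def zien_alt (hoeden : List String) : List String :=
  (hoeden.foldl
    (fun (st : List String × Bool) hoed =>
      let kleuren := st.1 ++ [if st.2 then "R" else "B"]
      let parity := if hoed == "R" then !st.2 else st.2
      (kleuren, parity))
    ([], false)).1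

-- ===== PRECONDITION & SPEC =====
def Spec_zien (hoeden : List String) (out : List String) : Prop := out = zien_alt hoeden
instance (hoeden : List String) (out : List String) : Decidable (Spec_zien hoeden out) := by unfold Spec_zien; infer_instance

-- ===== CLAIM (what is proved, stated in full; the proofs are below) =====
def Claim_equal_zien : Prop := ∀ (hoeden : List String), Dom_zien hoeden → Spec_zien hoeden (zien hoeden)

-- ===== LEMMAS AND PROOFS =====

-- A's loop, characterised: position k gets 'R' iff the prefix of length k has an odd red count
theorem zien_eq_map (hoeden : List String) :
    zien hoeden
      = (List.range hoeden.length).map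
          (fun k => if List.count "R" (hoeden.take k) % 2 = 1 then "R" else "B") := by
  unfold zien
  have hbody : (fun (kleuren : List String) (i : Int) =>
      let aantal := PySem.List.count (PySem.List.slice hoeden none (some i)) "R"
      if aantal % 2 = 1 then kleuren ++ ["R"] else kleuren ++ ["B"])
      = fun kleuren i => kleuren ++
          [if PySem.List.count (PySem.List.slice hoeden none (some i)) "R" % 2 = 1
           then "R" else "B"] := by
    funext kleuren i
    exact (apply_ite (fun s => kleuren ++ [s]) _ "R" "B").symm
  rw [hbody, PySem.List.foldl_append_singleton_eq_map, PySem.List.pyRange_one]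
  simp only [List.map_map, List.nil_append, sub_zero, Int.toNat_natCast]
  refine List.map_congr_left (fun k hk => ?_)
  simp only [Function.comp_apply, zero_add]
  rw [PySem.List.slice_to hoeden (by positivity), Int.toNat_natCast,
    PySem.List.count_eq]

-- the expected answer, computed structurally with an explicit running parity
def spine : List String → Bool → List String
  | [], _ => []
  | h :: t, p => (if p then "R" else "B") :: spine t (if h == "R" then !p else p)

-- B's loop, characterised: it appends exactly `spine`
theorem alt_loop (l : List String) (p : Bool) (acc : List String) :
    (l.foldl
      (fun (st : List String × Bool) hoed =>
        let kleuren := st.1 ++ [if st.2 then "R" else "B"]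
        let parity := if hoed == "R" then !st.2 else st.2
        (kleuren, parity))
      (acc, p)).1
    = acc ++ spine l p := by
  induction l generalizing p acc with
  | nil => simp [spine]
  | cons h t ih =>
    simp only [List.foldl_cons, spine]
    rw [ih]
    simp

-- equal remainders mod 2 give the same colour
theorem ite_mod2 {a b : Nat} (hab : a % 2 = b % 2) :
    (if a % 2 = 1 then "R" else "B") = (if b % 2 = 1 then ("R" : String) else "B") := by
  rw [hab]

-- A's per-position parity-of-prefix-count formula also computes `spine`
theorem spine_eq (l : List String) (p : Bool) :
    spine l p
      = (List.range l.length).map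
          (fun k => if ((cond p 1 0) + List.count "R" (l.take k)) % 2 = 1 then "R" else "B") := by
  induction l generalizing p with
  | nil => simp [spine]
  | cons h t ih =>
    simp only [spine, List.length_cons, List.range_succ_eq_map, List.map_cons, List.map_map,
      List.take_zero, List.count_nil]
    congr 1
    · cases p <;> norm_num
    · rw [ih]
      refine List.map_congr_left (fun k hk => ?_)
      simp only [Function.comp_apply, List.take_succ_cons, List.count_cons]
      apply ite_mod2
      by_cases hh : h = "R" <;> cases p <;> simp [hh] <;> omega

-- ===== VERDICT (by name: the statement is the Claim_ definition above) =====
theorem zien_spec : Claim_equal_zien := by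
  intro hoeden _
  show zien hoeden = zien_alt hoeden
  rw [zien_eq_map]
  unfold zien_alt
  rw [alt_loop, spine_eq]
  simp
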